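-- pv_equiv track=rewrite | github.com/k-sunako/multi_mod_bernoulli | main.py | alg10_14x
-- ===== SOURCE A (Python) =====
-- def alg10_14x(i_ms_s, i_ms_e, f, M, i_f0, j_f0):
--     if i_ms_e - i_ms_s == 1:
--         return [f]
--     else:
--         f0 = f % M[i_f0][j_f0]
--         f1 = f % M[i_f0][j_f0+1]
--         return alg10_14x(i_ms_s, i_ms_s+(i_ms_e-i_ms_s)//2, f0, M, i_f0-1, 2*j_f0) \
--              + alg10_14x(i_ms_s+(i_ms_e-i_ms_s)//2, i_ms_e, f1, M, i_f0-1, 2*j_f0+2)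
-- ===== SOURCE B (Python) =====
-- def alg10_14x(i_ms_s, i_ms_e, f, M, i_f0, j_f0):
--     out = []
--     stack = [(i_ms_s, i_ms_e, f, i_f0, j_f0)]
--     while stack:
--         s, e, g, i, j = stack.pop()
--         if e - s == 1:
--             out.append(g)
--         else:
--             mid = s + (e - s) // 2
--             stack.append((mid, e, g % M[i][j + 1], i - 1, 2 * j + 2))
--             stack.append((s, mid, g % M[i][j], i - 1, 2 * j))
--     return out
-- ===== Notes on version B (the rewrite author's own statement) =====
-- stated objective: alternative
-- what changed: Replaces the binary recursion (recursive calls concatenating sublists) with an iterative explicit-stack DFS that pops frames and pushes right-then-left so leaves are appended to one output list in left-to-right order; Pre_ excludes exactly the inputs on which A raises (non-positive interval -> RecursionError, an actually-read modulus out of range -> IndexError, or zero -> ZeroDivisionError), stated in closed form via the bit-reversal characterization of which tree slots the unbalanced recursion reads.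
import Mathlib
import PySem

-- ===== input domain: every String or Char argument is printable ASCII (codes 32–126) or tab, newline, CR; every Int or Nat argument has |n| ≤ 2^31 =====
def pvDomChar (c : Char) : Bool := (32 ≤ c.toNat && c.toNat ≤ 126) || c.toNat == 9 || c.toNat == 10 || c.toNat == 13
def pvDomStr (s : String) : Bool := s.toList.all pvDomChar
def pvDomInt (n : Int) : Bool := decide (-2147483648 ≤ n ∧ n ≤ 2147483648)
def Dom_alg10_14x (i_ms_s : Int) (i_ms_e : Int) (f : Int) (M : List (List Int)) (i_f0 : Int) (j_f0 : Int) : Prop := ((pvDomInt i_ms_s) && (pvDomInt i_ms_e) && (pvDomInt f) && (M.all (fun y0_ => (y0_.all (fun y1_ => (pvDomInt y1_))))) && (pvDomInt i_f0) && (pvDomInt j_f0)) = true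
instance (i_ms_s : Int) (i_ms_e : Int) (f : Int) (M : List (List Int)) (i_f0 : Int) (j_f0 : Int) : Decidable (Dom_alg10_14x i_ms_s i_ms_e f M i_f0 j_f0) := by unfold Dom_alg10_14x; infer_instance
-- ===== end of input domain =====

-- B replaces A's binary recursion by an explicit-stack iterative DFS producing leaves left-to-right.
-- Both Lean ports are totalized with fuel and a default lookup (getM); inside Pre_ the fuel is
-- sufficient and the defaults are never reached.

-- ===== PORT A =====
-- M[i][j] with Python index semantics (negative wraps), defaulted (the default is only reached outside Pre_).
def getM (M : List (List Int)) (i j : Int) : Int :=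
  PySem.List.pyGetD (PySem.List.pyGetD M i []) j 1

-- literal recursion of A; fuel (i_ms_e - i_ms_s).toNat is enough whenever 1 ≤ i_ms_e - i_ms_s
def algA (M : List (List Int)) : Nat → Int → Int → Int → Int → Int → List Int
  | 0, _, _, f, _, _ => [f]
  | fuel+1, s, e, f, i, j =>
    if e - s = 1 then [f]
    else
      let f0 := PySem.Int.mod f (getM M i j)
      let f1 := PySem.Int.mod f (getM M i (j+1))
      algA M fuel s (s + PySem.Int.floordiv (e-s) 2) f0 (i-1) (2*j)
        ++ algA M fuel (s + PySem.Int.floordiv (e-s) 2) e f1 (i-1) (2*j+2)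

def alg10_14x (i_ms_s : Int) (i_ms_e : Int) (f : Int) (M : List (List Int)) (i_f0 : Int) (j_f0 : Int) : List Int :=
  algA M (i_ms_e - i_ms_s).toNat i_ms_s i_ms_e f i_f0 j_f0

-- ===== PORT B =====
-- a stack frame (s, e, f, i, j)
def loopB (M : List (List Int)) : Nat → List (Int × Int × Int × Int × Int) → List Int → List Int
  | 0, _, out => out
  | fuel+1, stack, out =>
    match stack with
    | [] => out
    | (s, e, g, i, j) :: rest =>
      if e - s = 1 then loopB M fuel rest (out ++ [g])
      else
        let mid := s + PySem.Int.floordiv (e-s) 2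
        let f1 := PySem.Int.mod g (getM M i (j+1))
        let f0 := PySem.Int.mod g (getM M i j)
        loopB M fuel ((s, mid, f0, i-1, 2*j) :: (mid, e, f1, i-1, 2*j+2) :: rest) out

def alg10_14x_alt (i_ms_s : Int) (i_ms_e : Int) (f : Int) (M : List (List Int)) (i_f0 : Int) (j_f0 : Int) : List Int :=
  loopB M (2*(i_ms_e - i_ms_s)).toNat [(i_ms_s, i_ms_e, f, i_f0, j_f0)] []

-- ===== PRECONDITION & SPEC =====
-- true iff Python's M[i][j] yields a nonzero value (negative indices wrap; false = IndexError or zero modulus)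
def entryOK (M : List (List Int)) (i j : Int) : Bool :=
  match PySem.List.pyGet? M i with
  | none => false
  | some row =>
    match PySem.List.pyGet? row j with
    | none => false
    | some v => v != 0

-- bit-reversal of the low d bits (pure combinatorics on the input indices, no program state)
def revBits : Nat → Nat → Nat
  | 0, _ => 0
  | d+1, c => (c % 2) * 2^d + revBits d (c / 2)

-- Pre_ excludes EXACTLY the inputs on which Python A raises: a non-positive interval (the recursion
-- never terminates → RecursionError) or an actually-read modulus slot that is out of range (IndexError)
-- or zero (ZeroDivisionError).  With n = i_ms_e - i_ms_s, the internal node of rank c (left-to-right)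
-- at depth d exists iff n + revBits d c ≥ 2^(d+1) — the closed form of the ⌊n/2⌋/⌈n/2⌉ split — and it
-- reads M[i_f0-d] at columns 2^d·j_f0 + 2c and 2^d·j_f0 + 2c + 1; Pre_ demands precisely those reads succeed.
def Pre_alg10_14x (i_ms_s : Int) (i_ms_e : Int) (f : Int) (M : List (List Int)) (i_f0 : Int) (j_f0 : Int) : Prop :=
  1 ≤ i_ms_e - i_ms_s ∧
  ∀ d ∈ List.range 32, (2:Int)^d < i_ms_e - i_ms_s →
    ∀ k ∈ List.range (min (2^d) ((i_ms_e - i_ms_s) - 2^d).toNat),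
      let c : Int := (revBits d (2^d - min (2^d) ((i_ms_e - i_ms_s) - 2^d).toNat + k) : Nat)
      entryOK M (i_f0 - d) ((2:Int)^d * j_f0 + 2*c) = true ∧
      entryOK M (i_f0 - d) ((2:Int)^d * j_f0 + 2*c + 1) = true
instance (i_ms_s : Int) (i_ms_e : Int) (f : Int) (M : List (List Int)) (i_f0 : Int) (j_f0 : Int) : Decidable (Pre_alg10_14x i_ms_s i_ms_e f M i_f0 j_f0) := by unfold Pre_alg10_14x; infer_instance

def pvWitness_alg10_14x : Int × Int × Int × List (List Int) × Int × Int := (0, 2, 5, [[3, 4]], 0, 0)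

def Spec_alg10_14x (i_ms_s : Int) (i_ms_e : Int) (f : Int) (M : List (List Int)) (i_f0 : Int) (j_f0 : Int) (out : List Int) : Prop := out = alg10_14x_alt i_ms_s i_ms_e f M i_f0 j_f0
instance (i_ms_s : Int) (i_ms_e : Int) (f : Int) (M : List (List Int)) (i_f0 : Int) (j_f0 : Int) (out : List Int) : Decidable (Spec_alg10_14x i_ms_s i_ms_e f M i_f0 j_f0 out) := by unfold Spec_alg10_14x; infer_instance

-- ===== CLAIM (what is proved, stated in full; the proofs are below) =====
def Claim_equal_alg10_14x : Prop := ∀ (i_ms_s : Int) (i_ms_e : Int) (f : Int) (M : List (List Int)) (i_f0 : Int) (j_f0 : Int), Dom_alg10_14x i_ms_s i_ms_e f M i_f0 j_f0 → Pre_alg10_14x i_ms_s i_ms_e f M i_f0 j_f0 → Spec_alg10_14x i_ms_s i_ms_e f M i_f0 j_f0 (alg10_14x i_ms_s i_ms_e f M i_f0 j_f0)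

-- ===== LEMMAS AND PROOFS =====

-- the normalized value of A's recursion (canonical fuel)
def evalN (M : List (List Int)) (s e f i j : Int) : List Int :=
  algA M (e - s).toNat s e f i j

lemma floordiv_half_bounds (n : Int) (hn : 2 ≤ n) :
    1 ≤ PySem.Int.floordiv n 2 ∧ PySem.Int.floordiv n 2 ≤ n - 1 := by
  rw [PySem.Int.floordiv_eq_ediv_of_pos (by omega)]
  omega

lemma algA_fuel (M : List (List Int)) :
    ∀ (fuel : Nat) (s e f i j : Int), 1 ≤ e - s → e - s ≤ (fuel : Int) →
      algA M fuel s e f i j = evalN M s e f i j := by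
  intro fuel
  induction fuel using Nat.strong_induction_on with
  | _ fuel ih =>
    intro s e f i j h1 h2
    match fuel with
    | 0 => omega
    | fuel+1 =>
      by_cases hb : e - s = 1
      · have ht : (e - s).toNat = 1 := by omega
        unfold evalN
        rw [ht]
        simp [algA, hb]
      · have hn : 2 ≤ e - s := by omega
        obtain ⟨hq1, hq2⟩ := floordiv_half_bounds (e - s) hn
        set q := PySem.Int.floordiv (e - s) 2 with hq
        have e1 : algA M fuel s (s + q) (PySem.Int.mod f (getM M i j)) (i-1) (2*j)
            = evalN M s (s + q) (PySem.Int.mod f (getM M i j)) (i-1) (2*j) := by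
          apply ih fuel (by omega) <;> omega
        have e2 : algA M fuel (s + q) e (PySem.Int.mod f (getM M i (j+1))) (i-1) (2*j+2)
            = evalN M (s + q) e (PySem.Int.mod f (getM M i (j+1))) (i-1) (2*j+2) := by
          apply ih fuel (by omega) <;> omega
        have hk : ∃ k : Nat, (e - s).toNat = k + 1 ∧ e - s ≤ (k : Int) + 1 := by
          refine ⟨(e - s).toNat - 1, by omega, by omega⟩
        obtain ⟨k, hk1, hk2⟩ := hk
        have e1' : algA M k s (s + q) (PySem.Int.mod f (getM M i j)) (i-1) (2*j)
            = evalN M s (s + q) (PySem.Int.mod f (getM M i j)) (i-1) (2*j) := by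
          apply ih k (by omega) <;> omega
        have e2' : algA M k (s + q) e (PySem.Int.mod f (getM M i (j+1))) (i-1) (2*j+2)
            = evalN M (s + q) e (PySem.Int.mod f (getM M i (j+1))) (i-1) (2*j+2) := by
          apply ih k (by omega) <;> omega
        conv_rhs => rw [evalN, hk1]
        simp only [algA, hb, if_false]
        rw [e1, e2, e1', e2']

-- one unfolding step of the normalized recursion at an internal node
lemma evalN_step (M : List (List Int)) (s e f i j : Int) (h1 : 1 ≤ e - s) (hb : e - s ≠ 1) :
    evalN M s e f i j =
      evalN M s (s + PySem.Int.floordiv (e-s) 2) (PySem.Int.mod f (getM M i j)) (i-1) (2*j)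
        ++ evalN M (s + PySem.Int.floordiv (e-s) 2) e (PySem.Int.mod f (getM M i (j+1))) (i-1) (2*j+2) := by
  have hn : 2 ≤ e - s := by omega
  obtain ⟨hq1, hq2⟩ := floordiv_half_bounds (e - s) hn
  set q := PySem.Int.floordiv (e - s) 2 with hq
  have hk : ∃ k : Nat, (e - s).toNat = k + 1 := ⟨(e - s).toNat - 1, by omega⟩
  obtain ⟨k, hk1⟩ := hk
  conv_lhs => rw [evalN, hk1]
  simp only [algA, hb, if_false]
  rw [algA_fuel M k s (s+q) _ _ _ (by omega) (by omega),
      algA_fuel M k (s+q) e _ _ _ (by omega) (by omega)]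

lemma evalN_leaf (M : List (List Int)) (s e f i j : Int) (h : e - s = 1) :
    evalN M s e f i j = [f] := by
  have h1 : (e - s).toNat = 1 := by omega
  rw [evalN, h1]
  simp [algA, h]

-- cost of a stack: number of loop iterations it still causes
def costB (stack : List (Int × Int × Int × Int × Int)) : Int :=
  (stack.map (fun fr => 2 * (fr.2.1 - fr.1) - 1)).sum

lemma loopB_inv (M : List (List Int)) :
    ∀ (fuel : Nat) (stack : List (Int × Int × Int × Int × Int)) (out : List Int),
      (∀ fr ∈ stack, 1 ≤ fr.2.1 - fr.1) →
      costB stack ≤ (fuel : Int) →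
      loopB M fuel stack out
        = out ++ (stack.map (fun fr => evalN M fr.1 fr.2.1 fr.2.2.1 fr.2.2.2.1 fr.2.2.2.2)).flatten := by
  intro fuel
  induction fuel with
  | zero =>
    intro stack out hpos hcost
    match stack with
    | [] => simp [loopB]
    | fr :: rest =>
      exfalso
      have h1 : 1 ≤ fr.2.1 - fr.1 := hpos fr (by simp)
      have h2 : 0 ≤ costB rest := by
        unfold costB
        apply List.sum_nonneg
        intro x hx
        simp only [List.mem_map] at hx
        obtain ⟨fr', hfr', rfl⟩ := hx
        have := hpos fr' (by simp [hfr'])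
        omega
      have : costB (fr :: rest) = (2 * (fr.2.1 - fr.1) - 1) + costB rest := by
        simp [costB]
      omega
  | succ fuel ih =>
    intro stack out hpos hcost
    match stack with
    | [] => simp [loopB]
    | (s, e, g, i, j) :: rest =>
      have h1 : 1 ≤ e - s := hpos (s, e, g, i, j) (by simp)
      have hcost' : costB ((s, e, g, i, j) :: rest) = (2 * (e - s) - 1) + costB rest := by
        simp [costB]
      by_cases hb : e - s = 1
      · simp only [loopB, hb, if_true]
        rw [ih rest (out ++ [g]) (fun fr hfr => hpos fr (by simp [hfr])) (by omega)]
        simp [evalN_leaf M s e g i j hb]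
      · have hn : 2 ≤ e - s := by omega
        obtain ⟨hq1, hq2⟩ := floordiv_half_bounds (e - s) hn
        simp only [loopB, hb, if_false]
        set q := PySem.Int.floordiv (e - s) 2 with hq
        set f1 := PySem.Int.mod g (getM M i (j+1)) with hf1
        set f0 := PySem.Int.mod g (getM M i j) with hf0
        have hpos' : ∀ fr ∈ ((s, s+q, f0, i-1, 2*j) :: (s+q, e, f1, i-1, 2*j+2) :: rest),
            1 ≤ fr.2.1 - fr.1 := by
          intro fr hfr
          simp only [List.mem_cons] at hfr
          rcases hfr with rfl | rfl | hfr
          · simp; omega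
          · simp; omega
          · exact hpos fr (by simp [hfr])
        have hcost'' : costB ((s, s+q, f0, i-1, 2*j) :: (s+q, e, f1, i-1, 2*j+2) :: rest)
            = (2*q - 1) + ((2*((e) - (s+q)) - 1) + costB rest) := by
          simp [costB]
        rw [ih _ out hpos' (by rw [hcost'']; omega)]
        have hqe : q = (e - s) / 2 := by
          rw [hq, PySem.Int.floordiv_eq_ediv_of_pos (by omega)]
        simp [evalN_step M s e g i j h1 hb, ← hqe, ← hf0, ← hf1]

-- ===== VERDICT (by name: the statement is the Claim_ definition above) =====
theorem alg10_14x_spec : Claim_equal_alg10_14x := by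
  intro s e f M i j _hdom hpre
  unfold Spec_alg10_14x alg10_14x alg10_14x_alt
  have h1 : 1 ≤ e - s := hpre.1
  rw [loopB_inv M _ _ _ (by intro fr hfr; simp at hfr; subst hfr; simpa using h1)
      (by unfold costB; simp only [List.map_cons, List.map_nil, List.sum_cons, List.sum_nil]; omega)]
  simp [evalN]
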